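-- pv_equiv track=rewrite | github.com/sergeylobachev/leetcode | Contests/Weekly Contest 364/3.py | solution
-- ===== SOURCE A (Python) =====
-- def solution(nums):
--     N = len(nums)
--     l = [0] * N
--     r = [0] * N
--
--     s = []
--     cursum = 0
--     for i, num in enumerate(nums):
--         counter = 1
--         while len(s) > 0 and num <= s[-1][0]:
--             popped_val, popped_count = s.pop()
--             cursum -= (popped_val - num) * popped_count
--             counter += popped_count
--
--         cursum += num
--         s.append((num, counter))
--         l[i] = cursum
--
--     s = []
--     cursum = 0
--     for i, num in enumerate(nums[::-1]):
--         counter = 1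
--         while len(s) > 0 and num <= s[-1][0]:
--             popped_val, popped_count = s.pop()
--             cursum -= (popped_val - num) * popped_count
--             counter += popped_count
--
--         cursum += num
--         s.append((num, counter))
--         r[i] = cursum
--
--     r = r[::-1]
--
--     ans = 0
--     for i in range(N):
--         ans = max(ans, l[i]+r[i]-nums[i])
--
--     return ans
-- ===== SOURCE B (Python) =====
-- def solution(nums):
--     N = len(nums)
--     ans = 0
--     for i in range(N):
--         x = nums[i]
--         total = x
--         cap = x
--         for j in range(i - 1, -1, -1):
--             cap = min(cap, nums[j])
--             total += cap
--         cap = x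
--         for j in range(i + 1, N):
--             cap = min(cap, nums[j])
--             total += cap
--         ans = max(ans, total)
--     return ans
-- ===== Notes on version B (the rewrite author's own statement) =====
-- stated objective: simpler
-- what changed: Replaces the two monotonic-stack passes with auxiliary l/r arrays by a direct per-peak scan: for each candidate peak walk left and right keeping a running minimum cap and summing it.
import Mathlib
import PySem

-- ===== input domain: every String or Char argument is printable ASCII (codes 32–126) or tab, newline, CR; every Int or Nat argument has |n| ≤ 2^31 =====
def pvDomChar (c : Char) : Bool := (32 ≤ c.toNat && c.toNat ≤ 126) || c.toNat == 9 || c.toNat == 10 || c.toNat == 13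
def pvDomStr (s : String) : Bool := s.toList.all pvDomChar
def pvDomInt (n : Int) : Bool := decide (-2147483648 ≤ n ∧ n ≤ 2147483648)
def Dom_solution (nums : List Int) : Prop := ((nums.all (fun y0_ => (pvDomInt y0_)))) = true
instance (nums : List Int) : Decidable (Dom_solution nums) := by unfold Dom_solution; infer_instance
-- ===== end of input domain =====

-- B replaces A's two monotonic-stack passes by a direct per-peak running-minimum scan
-- in each direction (simpler, not faster: O(n^2) vs A's O(n)).

-- ===== PORT A =====
-- the inner 'while' loop: pops while num <= top value, adjusting cursum and counter
def popLoop (num : Int) : List (Int × Int) → Int → Int → List (Int × Int) × Int × Int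
  | [], cursum, counter => ([], cursum, counter)
  | (v, c) :: rest, cursum, counter =>
      if num ≤ v then popLoop num rest (cursum - (v - num) * c) (counter + c)
      else ((v, c) :: rest, cursum, counter)

-- one iteration of the stack pass; the stack top (Python s[-1]) is the list head
def passStep (st : List (Int × Int) × Int × List Int) (num : Int) :
    List (Int × Int) × Int × List Int :=
  let r := popLoop num st.1 st.2.1 1
  ((num, r.2.2) :: r.1, r.2.1 + num, st.2.2 ++ [r.2.1 + num])

-- one full pass, producing the l (resp. r, before reversal) array in order
def passA (nums : List Int) : List Int := (nums.foldl passStep ([], 0, [])).2.2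

def solution (nums : List Int) : Int :=
  let l := passA nums
  let r := (passA nums.reverse).reverse
  -- l[i], r[i], nums[i]: all indices are < length, where getD is exact
  (List.range nums.length).foldl
    (fun ans i => max ans (l.getD i 0 + r.getD i 0 - nums.getD i 0)) 0

-- ===== PORT B =====
-- walk the indices js keeping the running minimum cap, adding it to total each step
def scanDir (nums : List Int) : List Nat → Int → Int → Int
  | [], _, total => total
  | j :: js, cap, total =>
      let cap' := min cap (nums.getD j 0)
      scanDir nums js cap' (total + cap')

def solution_alt (nums : List Int) : Int :=
  (List.range nums.length).foldl
    (fun ans i =>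
      let x := nums.getD i 0
      let tl := scanDir nums (List.range i).reverse x x
      let t := scanDir nums (List.range' (i + 1) (nums.length - (i + 1))) x tl
      max ans t) 0

-- ===== PRECONDITION & SPEC =====
def Spec_solution (nums : List Int) (out : Int) : Prop := out = solution_alt nums
instance (nums : List Int) (out : Int) : Decidable (Spec_solution nums out) := by unfold Spec_solution; infer_instance

-- ===== CLAIM (what is proved, stated in full; the proofs are below) =====
def Claim_equal_solution : Prop := ∀ (nums : List Int), Dom_solution nums → Spec_solution nums (solution nums)

-- ===== LEMMAS AND PROOFS =====

-- mList p = the list of suffix minima of p: entry j is min(p[j..])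
def mf (acc : List Int) (x : Int) : List Int := acc.map (fun y => min y x) ++ [x]
def mList (p : List Int) : List Int := p.foldl mf []

-- expansion of a (value, count) stack into the run-length-encoded list it denotes
def expandS (s : List (Int × Int)) : List Int :=
  s.flatMap (fun pr => List.replicate pr.2.toNat pr.1)

-- running minima of a list, seeded with cap
def pminsB (cap : Int) : List Int → List Int
  | [] => []
  | v :: vs => (min cap v) :: pminsB (min cap v) vs

lemma mList_snoc (p : List Int) (x : Int) :
    mList (p ++ [x]) = (mList p).map (fun y => min y x) ++ [x] := by
  simp [mList, List.foldl_append, mf]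

lemma popLoop_eq (num : Int) : ∀ (s : List (Int × Int)) (cursum counter : Int),
    popLoop num s cursum counter =
      (s.dropWhile (fun pr => decide (num ≤ pr.1)),
       cursum - ((s.takeWhile (fun pr => decide (num ≤ pr.1))).map
          (fun pr => (pr.1 - num) * pr.2)).sum,
       counter + ((s.takeWhile (fun pr => decide (num ≤ pr.1))).map Prod.snd).sum) := by
  intro s
  induction s with
  | nil => intro cursum counter; simp [popLoop]
  | cons pr rest ih =>
    intro cursum counter
    obtain ⟨v, c⟩ := pr
    by_cases h : num ≤ v
    · simp only [popLoop, if_pos h, ih, List.dropWhile_cons, List.takeWhile_cons,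
        decide_eq_true h]
      simp
      constructor <;> ring
    · simp [popLoop, h]

lemma dropWhile_all_lt (x : Int) : ∀ (s : List (Int × Int)),
    s.Pairwise (fun a b => b.1 < a.1) →
    ∀ pr ∈ s.dropWhile (fun pr => decide (x ≤ pr.1)), pr.1 < x := by
  intro s
  induction s with
  | nil => simp
  | cons hd tl ih =>
    intro hp pr hpr
    by_cases h : x ≤ hd.1
    · exact ih (List.Pairwise.sublist (List.sublist_cons_self hd tl) hp) pr
        (by simpa [List.dropWhile_cons, h] using hpr)
    · rw [List.dropWhile_cons_of_neg (by simpa using h)] at hpr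
      rcases List.mem_cons.mp hpr with h1 | h2
      · subst h1; omega
      · exact lt_trans ((List.pairwise_cons.mp hp).1 pr h2) (by omega)

-- combined arithmetic facts about the popped (takeWhile) part
lemma tw_sum_facts (x : Int) : ∀ (tw : List (Int × Int)), (∀ pr ∈ tw, 1 ≤ pr.2) →
    ((expandS tw).length : Int) = (tw.map Prod.snd).sum ∧
    (expandS tw).sum - (tw.map (fun pr => (pr.1 - x) * pr.2)).sum
      = ((expandS tw).length : Int) * x := by
  intro tw
  induction tw with
  | nil => simp [expandS]
  | cons pr rest ih =>
    intro hc
    obtain ⟨v, c⟩ := pr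
    have hc1 : (1 : Int) ≤ c := hc (v, c) (by simp)
    have hrest := ih (fun q hq => hc q (by simp [hq]))
    have hcast : ((c.toNat : Int)) = c := Int.toNat_of_nonneg (by omega)
    have h1 := hrest.1
    have h2 := hrest.2
    simp only [expandS, List.flatMap_cons, List.sum_append, List.length_append,
      List.map_cons, List.sum_cons, List.sum_replicate, List.length_replicate,
      nsmul_eq_mul, Nat.cast_add] at h1 h2 ⊢
    rw [hcast]
    constructor
    · omega
    · linear_combination h2

-- one step of the pass preserves the stack invariant
lemma step_inv (p : List Int) (s : List (Int × Int)) (cs x : Int)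
    (he : expandS s = (mList p).reverse)
    (hs : s.Pairwise (fun a b => b.1 < a.1))
    (hc : ∀ pr ∈ s, 1 ≤ pr.2) :
    expandS ((x, (popLoop x s cs 1).2.2) :: (popLoop x s cs 1).1) = (mList (p ++ [x])).reverse ∧
    ((x, (popLoop x s cs 1).2.2) :: (popLoop x s cs 1).1).Pairwise (fun a b => b.1 < a.1) ∧
    (∀ pr ∈ ((x, (popLoop x s cs 1).2.2) :: (popLoop x s cs 1).1), 1 ≤ pr.2) ∧
    (cs = (mList p).sum → (popLoop x s cs 1).2.1 + x = (mList (p ++ [x])).sum) := by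
  rw [popLoop_eq]
  simp only
  set P : Int × Int → Bool := fun pr => decide (x ≤ pr.1) with hP
  set tw := s.takeWhile P with htwdef
  set dw := s.dropWhile P with hdwdef
  have htd : tw ++ dw = s := List.takeWhile_append_dropWhile
  have htw : ∀ pr ∈ tw, x ≤ pr.1 := by
    intro pr hpr
    have := List.mem_takeWhile_imp hpr
    simpa [hP] using this
  have hdw : ∀ pr ∈ dw, pr.1 < x := dropWhile_all_lt x s hs
  have hc_tw : ∀ pr ∈ tw, 1 ≤ pr.2 := fun pr hpr =>
    hc pr ((List.takeWhile_sublist P).subset hpr)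
  have hc_dw : ∀ pr ∈ dw, 1 ≤ pr.2 := fun pr hpr =>
    hc pr ((List.dropWhile_sublist P).subset hpr)
  obtain ⟨hL, hS⟩ := tw_sum_facts x tw hc_tw
  have hes : expandS s = expandS tw ++ expandS dw := by
    rw [← htd]; simp [expandS]
  have hsum_nonneg : 0 ≤ (tw.map Prod.snd).sum :=
    List.sum_nonneg (by
      intro a ha
      obtain ⟨pr, hpr, rfl⟩ := List.mem_map.mp ha
      exact le_trans (by omega) (hc_tw pr hpr))
  have hcnt : (1 + (tw.map Prod.snd).sum).toNat = 1 + (expandS tw).length := by omega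
  have hmaptw : (expandS tw).map (fun y => min y x) =
      List.replicate (expandS tw).length x := by
    have : ∀ b ∈ (expandS tw).map (fun y => min y x), b = x := by
      intro b hb
      obtain ⟨a, ha, rfl⟩ := List.mem_map.mp hb
      obtain ⟨pr, hpr, ha2⟩ := List.mem_flatMap.mp ha
      have := List.eq_of_mem_replicate ha2
      subst this
      have := htw pr hpr
      omega
    rw [List.eq_replicate_of_mem this, List.length_map]
  have hmapdw : (expandS dw).map (fun y => min y x) = expandS dw := by
    have : ∀ a ∈ expandS dw, min a x = a := by
      intro a ha
      obtain ⟨pr, hpr, ha2⟩ := List.mem_flatMap.mp ha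
      have := List.eq_of_mem_replicate ha2
      subst this
      have := hdw pr hpr
      omega
    calc (expandS dw).map (fun y => min y x) = (expandS dw).map id :=
          List.map_congr_left this
      _ = expandS dw := List.map_id _
  have hrevmap : ((mList p).map (fun y => min y x)).reverse =
      List.replicate (expandS tw).length x ++ expandS dw := by
    rw [← List.map_reverse, ← he, hes, List.map_append, hmaptw, hmapdw]
  refine ⟨?_, ?_, ?_, ?_⟩
  · rw [mList_snoc, List.reverse_append]
    simp only [List.reverse_cons, List.reverse_nil, List.nil_append, List.singleton_append]
    rw [hrevmap]
    simp [expandS, hcnt]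
    rw [Nat.add_comm]
    simp [List.replicate_succ]
  · rw [List.pairwise_cons]
    exact ⟨fun pr hpr => hdw pr hpr, hs.sublist (List.dropWhile_sublist P)⟩
  · intro pr hpr
    rcases List.mem_cons.mp hpr with h1 | h2
    · subst h1; simp; omega
    · exact hc_dw pr h2
  · intro hcs
    have hsum_rev : ((mList p).map (fun y => min y x)).sum =
        ((expandS tw).length : Int) * x + (expandS dw).sum := by
      rw [← List.sum_reverse (((mList p).map (fun y => min y x))), hrevmap]
      simp [List.sum_replicate]
    have hcs' : (mList p).sum = (expandS tw).sum + (expandS dw).sum := by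
      rw [← List.sum_reverse (mList p), ← he, hes, List.sum_append]
    rw [mList_snoc, List.sum_append, hcs, hcs']
    simp only [List.sum_cons, List.sum_nil, hsum_rev]
    omega

-- the specification of the produced l array
def Lspec (p : List Int) : List Int :=
  (List.range p.length).map (fun k => (mList (p.take (k + 1))).sum)

lemma Lspec_snoc (p : List Int) (x : Int) :
    Lspec (p ++ [x]) = Lspec p ++ [(mList (p ++ [x])).sum] := by
  unfold Lspec
  rw [List.length_append, List.length_cons, List.length_nil, List.range_succ,
    List.map_append]
  congr 1
  · apply List.map_congr_left
    intro k hk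
    rw [List.mem_range] at hk
    rw [List.take_append_of_le_length (by omega)]
  · simp only [List.map_cons, List.map_nil]
    rw [List.take_of_length_le (by simp)]

lemma pass_general : ∀ (q p : List Int) (s : List (Int × Int)) (cs : Int) (acc : List Int),
    expandS s = (mList p).reverse → s.Pairwise (fun a b => b.1 < a.1) →
    (∀ pr ∈ s, 1 ≤ pr.2) → cs = (mList p).sum → acc = Lspec p →
    (q.foldl passStep (s, cs, acc)).2.2 = Lspec (p ++ q) := by
  intro q
  induction q with
  | nil => intro p s cs acc _ _ _ _ hacc; simpa using hacc
  | cons x q ih =>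
    intro p s cs acc he hs hc hcs hacc
    obtain ⟨h1, h2, h3, h4⟩ := step_inv p s cs x he hs hc
    have hstep : passStep (s, cs, acc) x =
        ((x, (popLoop x s cs 1).2.2) :: (popLoop x s cs 1).1,
         (popLoop x s cs 1).2.1 + x, acc ++ [(popLoop x s cs 1).2.1 + x]) := by
      simp [passStep]
    rw [List.foldl_cons, hstep]
    have := ih (p ++ [x]) ((x, (popLoop x s cs 1).2.2) :: (popLoop x s cs 1).1)
      ((popLoop x s cs 1).2.1 + x) (acc ++ [(popLoop x s cs 1).2.1 + x])
      h1 h2 h3 (h4 hcs) (by rw [Lspec_snoc, hacc, h4 hcs])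
    rw [this]
    simp

lemma passA_eq (nums : List Int) : passA nums = Lspec nums := by
  have h := pass_general nums [] [] 0 [] (by simp [expandS, mList]) (by simp)
    (by simp) (by simp [mList]) (by simp [Lspec])
  simpa [passA] using h

lemma Lspec_getD (p : List Int) (i : ℕ) (h : i < p.length) :
    (Lspec p).getD i 0 = (mList (p.take (i + 1))).sum := by
  rw [List.getD_eq_getElem _ _ (by simpa [Lspec] using h)]
  simp [Lspec]

lemma scanDir_eq (nums : List Int) : ∀ (js : List ℕ) (cap t : Int),
    scanDir nums js cap t = t + (pminsB cap (js.map (fun j => nums.getD j 0))).sum := by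
  intro js
  induction js with
  | nil => simp [scanDir, pminsB]
  | cons j js ih => intro cap t; simp [scanDir, pminsB, ih]; ring

lemma map_range_getD (nums : List Int) : ∀ (i : ℕ), i ≤ nums.length →
    (List.range i).map (fun j => nums.getD j 0) = nums.take i := by
  intro i
  induction i with
  | zero => simp
  | succ i ih =>
    intro h
    rw [List.range_succ, List.map_append, ih (by omega), List.take_add_one]
    simp [List.getElem?_eq_getElem (by omega : i < nums.length)]

lemma map_range'_getD (nums : List Int) : ∀ (k a : ℕ), a + k ≤ nums.length →
    (List.range' a k).map (fun j => nums.getD j 0) = (nums.drop a).take k := by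
  intro k
  induction k with
  | zero => simp
  | succ k ih =>
    intro a h
    rw [List.range'_succ, List.map_cons, ih (a + 1) (by omega)]
    rw [List.drop_eq_getElem_cons (by omega : a < nums.length), List.take_succ_cons]
    simp [List.getElem?_eq_getElem (by omega : a < nums.length)]

lemma pminsB_rev : ∀ (r : List Int) (x : Int),
    pminsB x r = ((mList r.reverse).map (fun y => min y x)).reverse := by
  intro r
  induction r with
  | nil => simp [pminsB, mList]
  | cons v r ih =>
    intro x
    rw [List.reverse_cons, mList_snoc]
    simp only [pminsB, List.map_append, List.map_map, List.map_cons, List.map_nil,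
      List.reverse_append, List.reverse_cons, List.reverse_nil, List.nil_append,
      List.singleton_append]
    rw [ih (min x v)]
    congr 1
    · omega
    · congr 1
      apply List.map_congr_left
      intro y _
      simp only [Function.comp_apply]
      omega

-- per-index equality of the two candidates
lemma pointwise (nums : List Int) (i : ℕ) (h : i < nums.length) :
    (Lspec nums).getD i 0 + ((Lspec nums.reverse).reverse).getD i 0 - nums.getD i 0 =
      scanDir nums (List.range' (i + 1) (nums.length - (i + 1))) (nums.getD i 0)
        (scanDir nums (List.range i).reverse (nums.getD i 0) (nums.getD i 0)) := by
  have hx : nums.getD i 0 = nums[i] := List.getD_eq_getElem _ _ h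
  set x := nums[i] with hxdef
  -- A's l[i]
  have hsnoc : nums.take (i + 1) = nums.take i ++ [x] := by
    rw [List.take_add_one]
    simp [List.getElem?_eq_getElem h, hxdef]
  have hl : (Lspec nums).getD i 0
      = ((mList (nums.take i)).map (fun y => min y x)).sum + x := by
    rw [Lspec_getD nums i h, hsnoc, mList_snoc, List.sum_append]
    simp
  -- A's r[i]
  have hdropc : nums.drop i = x :: nums.drop (i + 1) := List.drop_eq_getElem_cons h
  have htake : nums.reverse.take (nums.length - 1 - i + 1) = (nums.drop i).reverse := by
    have h1 : nums.length - 1 - i + 1 = nums.length - i := by omega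
    have h2 : nums.length - (nums.length - i) = i := by omega
    rw [h1, List.take_reverse, h2]
  have hr : ((Lspec nums.reverse).reverse).getD i 0
      = ((mList ((nums.drop (i + 1)).reverse)).map (fun y => min y x)).sum + x := by
    rw [List.getD_eq_getElem _ _ (by simp [Lspec]; omega), List.getElem_reverse]
    simp only [Lspec, List.length_map, List.length_range, List.length_reverse,
      List.getElem_map, List.getElem_range]
    rw [htake, hdropc, List.reverse_cons, mList_snoc, List.sum_append]
    simp
  -- B's two scans
  have hg1 : ((List.range i).reverse).map (fun j => nums.getD j 0)
      = (nums.take i).reverse := by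
    rw [List.map_reverse, map_range_getD nums i (by omega)]
  have hg2 : (List.range' (i + 1) (nums.length - (i + 1))).map (fun j => nums.getD j 0)
      = nums.drop (i + 1) := by
    rw [map_range'_getD nums _ _ (by omega)]
    exact List.take_of_length_le (by simp)
  have hp1 : (pminsB x ((nums.take i).reverse)).sum
      = ((mList (nums.take i)).map (fun y => min y x)).sum := by
    rw [pminsB_rev, List.reverse_reverse, List.sum_reverse]
  have hp2 : (pminsB x ((nums.drop (i + 1)))).sum
      = ((mList ((nums.drop (i + 1)).reverse)).map (fun y => min y x)).sum := by
    rw [pminsB_rev, List.sum_reverse]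
  rw [scanDir_eq, scanDir_eq, hx, hg1, hg2, hp1, hp2, hl, hr]
  ring

-- ===== VERDICT (by name: the statement is the Claim_ definition above) =====
theorem solution_spec : Claim_equal_solution := by
  intro nums _
  unfold Spec_solution solution solution_alt
  rw [passA_eq, passA_eq]
  apply PySem.List.foldl_congr_mem
  intro acc i hi
  rw [List.mem_range] at hi
  rw [pointwise nums i hi]
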